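-- pv_equiv track=rewrite | github.com/VibishanW/RISC-V-Vibi | assembler/main.py | emit_vhdl_rom
-- ===== SOURCE A (Python) =====
-- from typing import Dict, List, Optional, Tuple
--
-- def emit_vhdl_rom(image: List[Tuple[int, int]], depth: int = 1024, pad_with_nop: bool = True) -> str:
--     """
--     Emits lines for a VHDL ROM array indexed by word address.
--     """
--     image = sorted(image, key=lambda x: x[0])
--     words: Dict[int, int] = {}
--     for addr, word in image:
--         if addr % 4 != 0:
--             raise ValueError(f"Address 0x{addr:08X} is not word-aligned")
--         idx = addr // 4
--         if idx >= depth: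
--             raise ValueError(f"ROM depth {depth} too small for address 0x{addr:08X}")
--         words[idx] = word
--
--     lines: List[str] = []
--     for idx in sorted(words.keys()):
--         lines.append(f'    {idx} => x"{words[idx]:08X}",')
--
--     fill = 'x"00000013"' if pad_with_nop else '(others => \'0\')'
--     lines.append(f"    others => {fill}")
--     return "\n".join(lines)
-- ===== SOURCE B (Python) =====
-- def emit_vhdl_rom(image, depth=1024, pad_with_nop=True):
--     """
--     Emits lines for a VHDL ROM array indexed by word address.
--     Single streaming pass over the sorted image: runs of equal word addresses
--     are compressed on the fly (last write wins) via a pending entry, so no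
--     dict is built and no second sort of the keys is needed.
--     """
--     lines = []
--     pending = None  # (idx, word) of the current address run; last write wins
--     for addr, word in sorted(image, key=lambda x: x[0]):
--         if addr % 4 != 0:
--             raise ValueError(f"Address 0x{addr:08X} is not word-aligned")
--         idx = addr // 4
--         if idx >= depth:
--             raise ValueError(f"ROM depth {depth} too small for address 0x{addr:08X}")
--         if pending is not None and pending[0] != idx:
--             lines.append(f'    {pending[0]} => x"{pending[1]:08X}",')
--         pending = (idx, word)
--     if pending is not None:
--         lines.append(f'    {pending[0]} => x"{pending[1]:08X}",')
--     fill = 'x"00000013"' if pad_with_nop else '(others => \'0\')'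
--     lines.append(f"    others => {fill}")
--     return "\n".join(lines)
-- ===== Notes on version B (the rewrite author's own statement) =====
-- stated objective: alternative
-- what changed: Replaces A's dict keyed by addr//4 plus a second sort over its keys with a single streaming pass over the sorted image that compresses runs of equal word addresses via one pending (idx, word) entry (last write wins), emitting each line as soon as the address changes.
import Mathlib
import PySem

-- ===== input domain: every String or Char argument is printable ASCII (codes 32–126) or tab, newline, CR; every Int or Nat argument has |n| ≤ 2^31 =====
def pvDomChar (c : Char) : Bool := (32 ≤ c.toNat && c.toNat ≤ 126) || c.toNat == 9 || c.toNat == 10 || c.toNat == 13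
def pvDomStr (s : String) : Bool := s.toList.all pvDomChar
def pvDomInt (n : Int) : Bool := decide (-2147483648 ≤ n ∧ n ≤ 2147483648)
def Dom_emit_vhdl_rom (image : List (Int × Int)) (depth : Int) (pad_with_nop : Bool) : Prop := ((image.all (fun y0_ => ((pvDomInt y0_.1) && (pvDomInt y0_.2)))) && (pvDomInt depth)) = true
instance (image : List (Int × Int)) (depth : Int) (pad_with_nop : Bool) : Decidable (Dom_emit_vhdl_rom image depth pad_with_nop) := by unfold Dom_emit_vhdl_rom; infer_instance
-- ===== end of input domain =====

-- B replaces A's dict + key-resort with one streaming pass over the sorted image that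
-- compresses runs of equal word addresses via a pending entry (objective: simpler).


-- ===== PORT A =====
-- f"{n:08X}" by hand (PySem has no hex formatter): uppercase hex digits of |n|,
-- zero-padded to total width 8 INCLUDING a leading '-' for negatives — exact for every int.
def pvHexDigit (n : Nat) : Char := if n < 10 then Char.ofNat (48 + n) else Char.ofNat (55 + n)

def pvHexChars (n : Nat) : List Char :=
  if _h : n = 0 then [] else pvHexChars (n / 16) ++ [pvHexDigit (n % 16)]
  decreasing_by exact Nat.div_lt_self (Nat.pos_of_ne_zero _h) (by norm_num)

def pvFmt08X (n : Int) : String :=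
  if n < 0 then
    let d := pvHexChars n.natAbs
    String.ofList ('-' :: (List.replicate (7 - d.length) '0' ++ d))
  else
    let d := if n = 0 then ['0'] else pvHexChars n.toNat
    String.ofList (List.replicate (8 - d.length) '0' ++ d)

-- f'    {idx} => x"{w:08X}",' (the identical f-string appears in both Pythons)
def pvRomLine (idx w : Int) : String :=
  "    " ++ PySem.Int.toStr idx ++ " => x\"" ++ pvFmt08X w ++ "\","

-- A: sort by address, pour into a dict keyed by addr//4 (last write wins), then emit
-- over the re-sorted keys. The two 'raise' branches are excluded by Pre_; the
-- words[idx] lookup is getD 0 (every looked-up key is present).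
def emit_vhdl_rom (image : List (Int × Int)) (depth : Int) (pad_with_nop : Bool) : String :=
  let image2 := PySem.List.sorted image (fun x => x.1) false
  let words : PySem.Dict Int Int :=
    image2.foldl (fun d p => d.insert (PySem.Int.floordiv p.1 4) p.2) PySem.Dict.empty
  let lines : List String :=
    (PySem.List.sorted words.keys (fun k => k) false).foldl
      (fun acc idx => acc ++ [pvRomLine idx (words.getD idx 0)]) []
  let fill := if pad_with_nop then "x\"00000013\"" else "(others => '0')"
  PySem.Str.join "\n" (lines ++ ["    others => " ++ fill])

-- ===== PORT B =====
-- B: one pass over the sorted image; state = (emitted lines, pending (idx, word));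
-- the pending entry is flushed when the word address changes, so last write wins.
def emit_vhdl_rom_alt (image : List (Int × Int)) (depth : Int) (pad_with_nop : Bool) : String :=
  let st : List String × Option (Int × Int) :=
    (PySem.List.sorted image (fun x => x.1) false).foldl
      (fun st p =>
        let idx := PySem.Int.floordiv p.1 4
        let lines := match st.2 with
          | some q => if q.1 ≠ idx then st.1 ++ [pvRomLine q.1 q.2] else st.1
          | none => st.1
        (lines, some (idx, p.2)))
      ([], none)
  let lines := match st.2 with
    | some q => st.1 ++ [pvRomLine q.1 q.2]
    | none => st.1
  let fill := if pad_with_nop then "x\"00000013\"" else "(others => '0')"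
  PySem.Str.join "\n" (lines ++ ["    others => " ++ fill])

-- ===== PRECONDITION & SPEC =====
-- Pre_ excludes exactly the inputs on which A raises ValueError: a non-word-aligned
-- address, or a word index addr//4 reaching depth.
def Pre_emit_vhdl_rom (image : List (Int × Int)) (depth : Int) (pad_with_nop : Bool) : Prop :=
  ∀ p ∈ image, PySem.Int.mod p.1 4 = 0 ∧ PySem.Int.floordiv p.1 4 < depth
instance (image : List (Int × Int)) (depth : Int) (pad_with_nop : Bool) : Decidable (Pre_emit_vhdl_rom image depth pad_with_nop) := by unfold Pre_emit_vhdl_rom; infer_instance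

def pvWitness_emit_vhdl_rom : (List (Int × Int)) × Int × Bool := ([(4, 19), (0, 300), (4, 7)], 4, true)

def Spec_emit_vhdl_rom (image : List (Int × Int)) (depth : Int) (pad_with_nop : Bool) (out : String) : Prop := out = emit_vhdl_rom_alt image depth pad_with_nop
instance (image : List (Int × Int)) (depth : Int) (pad_with_nop : Bool) (out : String) : Decidable (Spec_emit_vhdl_rom image depth pad_with_nop out) := by unfold Spec_emit_vhdl_rom; infer_instance

-- ===== CLAIM (what is proved, stated in full; the proofs are below) =====
def Claim_equal_emit_vhdl_rom : Prop := ∀ (image : List (Int × Int)) (depth : Int) (pad_with_nop : Bool), Dom_emit_vhdl_rom image depth pad_with_nop → Pre_emit_vhdl_rom image depth pad_with_nop → Spec_emit_vhdl_rom image depth pad_with_nop (emit_vhdl_rom image depth pad_with_nop)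

-- ===== LEMMAS AND PROOFS =====

-- The canonical run-compressed image: for each run of equal word indices in s,
-- the last (idx, word) pair of the run, in order.
def pvCanon : List (Int × Int) → List (Int × Int)
  | [] => []
  | (a, w) :: t =>
    match t with
    | (b, _) :: _ =>
      if PySem.Int.floordiv b 4 = PySem.Int.floordiv a 4 then pvCanon t
      else (PySem.Int.floordiv a 4, w) :: pvCanon t
    | [] => [(PySem.Int.floordiv a 4, w)]

-- B's loop body / flush, named for the proofs (definitionally the lambdas in the port)
def pvStep (st : List String × Option (Int × Int)) (p : Int × Int) : List String × Option (Int × Int) :=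
  let idx := PySem.Int.floordiv p.1 4
  let lines := match st.2 with
    | some q => if q.1 ≠ idx then st.1 ++ [pvRomLine q.1 q.2] else st.1
    | none => st.1
  (lines, some (idx, p.2))

def pvFlush (st : List String × Option (Int × Int)) : List String :=
  match st.2 with
  | some q => st.1 ++ [pvRomLine q.1 q.2]
  | none => st.1

theorem pvStep_eq (lines : List String) (i w b v : Int) :
    pvStep (lines, some (i, w)) (b, v)
      = ((if i ≠ PySem.Int.floordiv b 4 then lines ++ [pvRomLine i w] else lines),
         some (PySem.Int.floordiv b 4, v)) := rfl

theorem pvCanon_cons_cons (a w b v : Int) (t : List (Int × Int)) :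
    pvCanon ((a, w) :: (b, v) :: t)
      = if PySem.Int.floordiv b 4 = PySem.Int.floordiv a 4 then pvCanon ((b, v) :: t)
        else (PySem.Int.floordiv a 4, w) :: pvCanon ((b, v) :: t) := rfl

-- B's loop with a pending entry computes the canonical compression (no hypotheses needed).
theorem pvB_loop (t : List (Int × Int)) : ∀ (lines : List String) (a w : Int),
    pvFlush (t.foldl pvStep (lines, some (PySem.Int.floordiv a 4, w)))
      = lines ++ (pvCanon ((a, w) :: t)).map (fun p => pvRomLine p.1 p.2) := by
  induction t with
  | nil => intro lines a w; simp [pvCanon, pvFlush]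
  | cons p t ih =>
    intro lines a w
    obtain ⟨b, v⟩ := p
    rw [List.foldl_cons, pvStep_eq, pvCanon_cons_cons]
    by_cases h : PySem.Int.floordiv b 4 = PySem.Int.floordiv a 4
    · rw [if_neg (not_not_intro h.symm), if_pos h, ih lines b v]
    · rw [if_pos (fun hh => h hh.symm), if_neg h, ih (lines ++ [pvRomLine (PySem.Int.floordiv a 4) w]) b v]
      simp

-- A's loop body, named
def pvIns (d : PySem.Dict Int Int) (p : Int × Int) : PySem.Dict Int Int :=
  d.insert (PySem.Int.floordiv p.1 4) p.2

-- floordiv · 4 is monotone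
theorem pvIdx_mono {a b : Int} (h : a ≤ b) :
    PySem.Int.floordiv a 4 ≤ PySem.Int.floordiv b 4 := by
  rw [PySem.Int.le_floordiv_iff_mul_le (by norm_num : (0:Int) < 4)]
  have := PySem.Int.floordiv_mul_add_mod a 4
  have := PySem.Int.mod_nonneg a (by norm_num : (0:Int) < 4)
  omega

-- inserting a key ≠ i leaves a front binding (i, w) in place
theorem pvInsert_mk_cons (i w k v : Int) (d : PySem.Dict Int Int) (h : k ≠ i) :
    (PySem.Dict.mk ((i, w) :: d.items)).insert k v
      = PySem.Dict.mk ((i, w) :: (d.insert k v).items) := by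
  have hik : (i == k) = false := by simp [Ne.symm h]
  apply PySem.Dict.ext
  by_cases hc : d.contains k = true
  · have hc' : (PySem.Dict.mk ((i, w) :: d.items)).contains k = true := by
      show ((i, w) :: d.items).any (fun p => p.1 == k) = true
      simp only [List.any_cons, hik, Bool.false_or]
      exact hc
    rw [PySem.Dict.items_insert_of_contains _ _ hc']
    show ((i, w) :: d.items).map _ = (i, w) :: (d.insert k v).items
    rw [PySem.Dict.items_insert_of_contains _ _ hc]
    simp only [List.map_cons, hik, Bool.false_eq_true, if_false]
  · have hc0 : d.contains k = false := by simpa using hc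
    have hc' : (PySem.Dict.mk ((i, w) :: d.items)).contains k = false := by
      show ((i, w) :: d.items).any (fun p => p.1 == k) = false
      simp only [List.any_cons, hik, Bool.false_or]
      exact hc0
    rw [PySem.Dict.items_insert_of_not_contains _ _ hc']
    show (i, w) :: d.items ++ [(k, v)] = (i, w) :: (d.insert k v).items
    rw [PySem.Dict.items_insert_of_not_contains _ _ hc0]
    simp

-- a front binding whose key the loop never touches stays in front and is inert
theorem pvFoldl_mk_cons (t : List (Int × Int)) : ∀ (d : PySem.Dict Int Int) (i w : Int),
    (∀ p ∈ t, PySem.Int.floordiv p.1 4 ≠ i) →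
    t.foldl pvIns (PySem.Dict.mk ((i, w) :: d.items))
      = PySem.Dict.mk ((i, w) :: (t.foldl pvIns d).items) := by
  induction t with
  | nil => intro d i w _; rfl
  | cons p t ih =>
    intro d i w h
    rw [List.foldl_cons, List.foldl_cons]
    show t.foldl pvIns ((PySem.Dict.mk ((i, w) :: d.items)).insert (PySem.Int.floordiv p.1 4) p.2) = _
    rw [pvInsert_mk_cons _ _ _ _ _ (h p (by simp))]
    exact ih _ i w (fun q hq => h q (by simp [hq]))

-- the items of A's dict, built over a key-sorted list, are exactly the compressed runs
theorem pvA_dict (s : List (Int × Int)) (hs : s.Pairwise (fun p q => p.1 ≤ q.1)) :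
    (s.foldl pvIns PySem.Dict.empty).items = pvCanon s := by
  induction s with
  | nil => rfl
  | cons p t ih =>
    obtain ⟨a, w⟩ := p
    rw [List.pairwise_cons] at hs
    match t, hs with
    | [], _ => rfl
    | (b, v) :: t', ⟨hle, hpt⟩ =>
      rw [pvCanon_cons_cons]
      by_cases h : PySem.Int.floordiv b 4 = PySem.Int.floordiv a 4
      · rw [if_pos h]
        have key : pvIns (pvIns PySem.Dict.empty (a, w)) (b, v) = pvIns PySem.Dict.empty (b, v) := by
          show (PySem.Dict.empty.insert (PySem.Int.floordiv a 4) w).insert (PySem.Int.floordiv b 4) v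
              = PySem.Dict.empty.insert (PySem.Int.floordiv b 4) v
          rw [h, PySem.Dict.insert_insert_self]
        rw [List.foldl_cons, List.foldl_cons, key, ← List.foldl_cons]
        exact ih hpt
      · rw [if_neg h]
        have h1 : PySem.Int.floordiv a 4 ≤ PySem.Int.floordiv b 4 :=
          pvIdx_mono (hle (b, v) (by simp))
        have hne : ∀ q ∈ (b, v) :: t', PySem.Int.floordiv q.1 4 ≠ PySem.Int.floordiv a 4 := by
          intro q hq
          have hb : b ≤ q.1 := by
            rcases List.mem_cons.mp hq with hq | hq
            · simp [hq]
            · rw [List.pairwise_cons] at hpt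
              exact hpt.1 q hq
          have h2 : PySem.Int.floordiv b 4 ≤ PySem.Int.floordiv q.1 4 := pvIdx_mono hb
          omega
        rw [List.foldl_cons]
        show (((b, v) :: t').foldl pvIns (PySem.Dict.empty.insert (PySem.Int.floordiv a 4) w)).items = _
        have hmk : PySem.Dict.empty.insert (PySem.Int.floordiv a 4) w
            = PySem.Dict.mk ((PySem.Int.floordiv a 4, w) :: (PySem.Dict.empty : PySem.Dict Int Int).items) := rfl
        rw [hmk, pvFoldl_mk_cons ((b, v) :: t') PySem.Dict.empty (PySem.Int.floordiv a 4) w hne]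
        show (PySem.Int.floordiv a 4, w) :: (((b, v) :: t').foldl pvIns PySem.Dict.empty).items = _
        rw [ih hpt]

-- every entry of pvCanon s comes from an entry of s
theorem pvCanon_mem (s : List (Int × Int)) :
    ∀ q ∈ pvCanon s, ∃ p ∈ s, q = (PySem.Int.floordiv p.1 4, p.2) := by
  induction s with
  | nil => intro q hq; cases hq
  | cons p t ih =>
    obtain ⟨a, w⟩ := p
    intro q hq
    match t with
    | [] =>
      simp [pvCanon] at hq
      exact ⟨(a, w), by simp, by simp [hq]⟩
    | (b, v) :: t' =>
      rw [pvCanon_cons_cons] at hq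
      by_cases h : PySem.Int.floordiv b 4 = PySem.Int.floordiv a 4
      · rw [if_pos h] at hq
        obtain ⟨p, hp, hpq⟩ := ih q hq
        exact ⟨p, by simp [hp], hpq⟩
      · rw [if_neg h] at hq
        rcases List.mem_cons.mp hq with hq | hq
        · exact ⟨(a, w), by simp, by simp [hq]⟩
        · obtain ⟨p, hp, hpq⟩ := ih q hq
          exact ⟨p, by simp [hp], hpq⟩

-- on a key-sorted list the compressed indices are strictly increasing
theorem pvCanon_pairwise (s : List (Int × Int)) (hs : s.Pairwise (fun p q => p.1 ≤ q.1)) :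
    (pvCanon s).Pairwise (fun p q => p.1 < q.1) := by
  induction s with
  | nil => exact List.Pairwise.nil
  | cons p t ih =>
    obtain ⟨a, w⟩ := p
    rw [List.pairwise_cons] at hs
    obtain ⟨hle, hpt⟩ := hs
    match t with
    | [] => simp [pvCanon]
    | (b, v) :: t' =>
      rw [pvCanon_cons_cons]
      by_cases h : PySem.Int.floordiv b 4 = PySem.Int.floordiv a 4
      · rw [if_pos h]; exact ih hpt
      · rw [if_neg h]
        refine List.Pairwise.cons ?_ (ih hpt)
        intro q hq
        obtain ⟨p, hp, hpq⟩ := pvCanon_mem _ q hq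
        have hb : b ≤ p.1 := by
          rcases List.mem_cons.mp hp with hp | hp
          · simp [hp]
          · rw [List.pairwise_cons] at hpt
            exact hpt.1 p hp
        have h1 : PySem.Int.floordiv a 4 ≤ PySem.Int.floordiv b 4 :=
          pvIdx_mono (hle (b, v) (by simp))
        have h2 : PySem.Int.floordiv b 4 ≤ PySem.Int.floordiv p.1 4 := pvIdx_mono hb
        have : q.1 = PySem.Int.floordiv p.1 4 := by rw [hpq]
        omega

-- A's emission loop over the re-sorted dict keys also produces the compressed runs
theorem pvLines_A (s : List (Int × Int)) (hs : s.Pairwise (fun p q => p.1 ≤ q.1)) :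
    (PySem.List.sorted (s.foldl pvIns PySem.Dict.empty).keys (fun k => k) false).foldl
      (fun acc idx => acc ++ [pvRomLine idx ((s.foldl pvIns PySem.Dict.empty).getD idx 0)]) []
    = (pvCanon s).map (fun p => pvRomLine p.1 p.2) := by
  have hitems : (s.foldl pvIns PySem.Dict.empty).items = pvCanon s := pvA_dict s hs
  have hkeys : (s.foldl pvIns PySem.Dict.empty).keys = (pvCanon s).map Prod.fst := by
    show (s.foldl pvIns PySem.Dict.empty).items.map Prod.fst = _
    rw [hitems]
  have hlt : (pvCanon s).Pairwise (fun p q => p.1 < q.1) := pvCanon_pairwise s hs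
  have hple : (s.foldl pvIns PySem.Dict.empty).keys.Pairwise
      (fun a b => (fun (k : Int) => k) a ≤ (fun (k : Int) => k) b) := by
    rw [hkeys]; exact List.pairwise_map.mpr (hlt.imp le_of_lt)
  have hnd : (s.foldl pvIns PySem.Dict.empty).keys.Nodup := by
    rw [hkeys]; exact List.pairwise_map.mpr (hlt.imp (fun h => ne_of_lt h))
  rw [PySem.List.sorted_eq_self_of_pairwise _ _ hple,
      PySem.List.foldl_append_singleton_eq_map, hkeys, List.nil_append, List.map_map]
  apply List.map_congr_left
  intro p hp
  have hmem : (p.1, p.2) ∈ (s.foldl pvIns PySem.Dict.empty).items := by rw [hitems]; simpa using hp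
  simp only [Function.comp]
  rw [PySem.Dict.getD_of_mem_items _ hmem hnd]

-- B's whole loop produces the compressed runs
theorem pvLines_B (s : List (Int × Int)) :
    pvFlush (s.foldl pvStep ([], none)) = (pvCanon s).map (fun p => pvRomLine p.1 p.2) := by
  match s with
  | [] => rfl
  | (a, w) :: t =>
    rw [List.foldl_cons]
    show pvFlush (t.foldl pvStep ([], some (PySem.Int.floordiv a 4, w))) = _
    rw [pvB_loop t [] a w, List.nil_append]

-- ===== VERDICT (by name: the statement is the Claim_ definition above) =====
theorem emit_vhdl_rom_spec : Claim_equal_emit_vhdl_rom := by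
  intro image depth pad_with_nop _ _
  show emit_vhdl_rom image depth pad_with_nop = emit_vhdl_rom_alt image depth pad_with_nop
  unfold emit_vhdl_rom emit_vhdl_rom_alt
  have hs : (PySem.List.sorted image (fun x => x.1) false).Pairwise (fun p q => p.1 ≤ q.1) :=
    PySem.List.sorted_pairwise image (fun x => x.1)
  show PySem.Str.join "\n"
      ((PySem.List.sorted ((PySem.List.sorted image (fun x => x.1) false).foldl pvIns PySem.Dict.empty).keys (fun k => k) false).foldl
        (fun acc idx => acc ++ [pvRomLine idx (((PySem.List.sorted image (fun x => x.1) false).foldl pvIns PySem.Dict.empty).getD idx 0)]) []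
        ++ ["    others => " ++ (if pad_with_nop then "x\"00000013\"" else "(others => '0')")])
    = PySem.Str.join "\n"
      (pvFlush ((PySem.List.sorted image (fun x => x.1) false).foldl pvStep ([], none))
        ++ ["    others => " ++ (if pad_with_nop then "x\"00000013\"" else "(others => '0')")])
  rw [pvLines_A _ hs, pvLines_B]
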